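-- pv_equiv track=rewrite | github.com/MrBrantCode/unitest_baseline | mut_generate/mist_train_cf/cf_82884/solution.py | five_div_seq
-- ===== SOURCE A (Python) =====
-- def five_div_seq(n: int) -> int:
--     num_list = [i for i in range(n - 1, 0, -1) if i % 9 == 0 or i % 14 == 0]
--     num_5_count = 0
--
--     for i in range(len(num_list) - 2):
--         if (num_list[i] - num_list[i+1]) % 2 == 0 and (num_list[i+1] - num_list[i+2]) % 2 == 0 and (num_list[i] - num_list[i+1]) == (num_list[i+1] - num_list[i+2]):
--             num_5_count += str(num_list[i]).count('5')
--             num_5_count += str(num_list[i+1]).count('5')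
--             num_5_count += str(num_list[i+2]).count('5')
--
--     return num_5_count
-- ===== SOURCE B (Python) =====
-- def five_div_seq(n: int) -> int:
--     # Inclusion-exclusion over the two arithmetic progressions, with the
--     # predecessor multiple computed by a closed-form floor-division formula.
--     def prev(x):
--         return max((x - 1) // 9 * 9, (x - 1) // 14 * 14)
--
--     def trip(a):
--         b = prev(a)
--         c = prev(b)
--         if c > 0 and a - b == b - c and (a - b) % 2 == 0:
--             return str(a).count('5') + str(b).count('5') + str(c).count('5')
--         return 0
--
--     return (sum(trip(a) for a in range(9, n, 9))
--             + sum(trip(a) for a in range(14, n, 14))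
--             - sum(trip(a) for a in range(126, n, 126)))
-- ===== Notes on version B (the rewrite author's own statement) =====
-- stated objective: alternative
-- what changed: Instead of materializing the descending filtered list and scanning its consecutive index triples, B sums by inclusion-exclusion over the progression of multiples of nine and the progression of multiples of fourteen (subtracting the common multiples), computing each element's two predecessor multiples directly by a closed-form floor-division formula instead of by adjacency in any list; no list, no ordering, no window.
import Mathlib
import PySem

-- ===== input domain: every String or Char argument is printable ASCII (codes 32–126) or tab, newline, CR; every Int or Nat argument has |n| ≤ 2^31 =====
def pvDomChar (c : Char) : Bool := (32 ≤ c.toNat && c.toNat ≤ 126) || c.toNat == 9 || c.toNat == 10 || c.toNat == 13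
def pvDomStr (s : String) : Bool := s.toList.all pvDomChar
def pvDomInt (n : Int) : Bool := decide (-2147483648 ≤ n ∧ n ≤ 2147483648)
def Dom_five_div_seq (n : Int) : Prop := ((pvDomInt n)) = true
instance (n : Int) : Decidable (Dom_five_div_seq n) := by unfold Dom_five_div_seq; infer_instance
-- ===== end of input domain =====

-- B replaces A's materialized descending list + indexed triple scan by an
-- inclusion-exclusion sum over the two arithmetic progressions, computing each
-- element's two predecessor multiples by a closed-form floor-division formula
-- (alternative algorithm, same asymptotic cost).

-- str(x).count('5'), as an Int
def pvCnt5 (x : Int) : Int := (PySem.Str.count (PySem.Int.toStr x) "5" : Int)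

-- i % 9 == 0 or i % 14 == 0
def pvIsMult (i : Int) : Bool := (PySem.Int.mod i 9 == 0) || (PySem.Int.mod i 14 == 0)

-- ===== PORT A =====
def five_div_seq (n : Int) : Int :=
  let num_list := (PySem.List.pyRange (n - 1) 0 (-1)).filter pvIsMult
  (PySem.List.pyRange 0 (PySem.List.len num_list - 2) 1).foldl
    (fun acc i =>
      let x := PySem.List.pyGetD num_list i 0
      let y := PySem.List.pyGetD num_list (i + 1) 0
      let z := PySem.List.pyGetD num_list (i + 2) 0
      if PySem.Int.mod (x - y) 2 = 0 ∧ PySem.Int.mod (y - z) 2 = 0 ∧ x - y = y - z then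
        acc + pvCnt5 x + pvCnt5 y + pvCnt5 z
      else acc) 0

-- ===== PORT B =====
-- prev(x) = max((x-1)//9*9, (x-1)//14*14): the largest multiple of 9 or 14 below x
def pvPrev (x : Int) : Int :=
  max (PySem.Int.floordiv (x - 1) 9 * 9) (PySem.Int.floordiv (x - 1) 14 * 14)

-- trip(a): the triple's '5'-count if (a, prev(a), prev(prev(a))) qualifies, else 0
def pvTripB (a : Int) : Int :=
  let b := pvPrev a
  let c := pvPrev b
  if 0 < c ∧ a - b = b - c ∧ PySem.Int.mod (a - b) 2 = 0 then
    pvCnt5 a + pvCnt5 b + pvCnt5 c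
  else 0

def five_div_seq_alt (n : Int) : Int :=
  ((PySem.List.pyRange 9 n 9).map pvTripB).sum
    + ((PySem.List.pyRange 14 n 14).map pvTripB).sum
    - ((PySem.List.pyRange 126 n 126).map pvTripB).sum

-- ===== PRECONDITION & SPEC =====
def Spec_five_div_seq (n : Int) (out : Int) : Prop := out = five_div_seq_alt n
instance (n : Int) (out : Int) : Decidable (Spec_five_div_seq n out) := by unfold Spec_five_div_seq; infer_instance

-- ===== CLAIM (what is proved, stated in full; the proofs are below) =====
def Claim_equal_five_div_seq : Prop := ∀ (n : Int), Dom_five_div_seq n → Spec_five_div_seq n (five_div_seq n)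

-- ===== LEMMAS AND PROOFS =====

theorem pvIsMult_iff (m : Int) : pvIsMult m = true ↔ 9 ∣ m ∨ 14 ∣ m := by
  simp [pvIsMult, PySem.Int.mod_eq_zero_iff_dvd, or_comm]
  -- (mod_eq_zero_iff_dvd is in the pysem default simp set)

theorem pvPrev_lt (x : Int) : pvPrev x < x := by
  unfold pvPrev
  rw [PySem.Int.floordiv_eq_ediv_of_pos (by norm_num),
     PySem.Int.floordiv_eq_ediv_of_pos (by norm_num)]
  omega

theorem pvPrev_mult (x : Int) : 9 ∣ pvPrev x ∨ 14 ∣ pvPrev x := by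
  unfold pvPrev
  rcases max_cases (PySem.Int.floordiv (x - 1) 9 * 9) (PySem.Int.floordiv (x - 1) 14 * 14) with
    ⟨h, _⟩ | ⟨h, _⟩
  · rw [h]; exact Or.inl (Dvd.intro_left _ rfl)
  · rw [h]; exact Or.inr (Dvd.intro_left _ rfl)

theorem pvPrev_maximal {m x : Int} (hlt : m < x) (hm : 9 ∣ m ∨ 14 ∣ m) : m ≤ pvPrev x := by
  unfold pvPrev
  rw [PySem.Int.floordiv_eq_ediv_of_pos (by norm_num),
     PySem.Int.floordiv_eq_ediv_of_pos (by norm_num)]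
  rcases hm with h | h
  · exact le_max_of_le_left (by omega)
  · exact le_max_of_le_right (by omega)

theorem pvPrev_eq {x y : Int} (hlt : y < x) (hm : 9 ∣ y ∨ 14 ∣ y)
    (hmax : ∀ m, m < x → (9 ∣ m ∨ 14 ∣ m) → m ≤ y) : pvPrev x = y :=
  le_antisymm (hmax _ (pvPrev_lt x) (pvPrev_mult x)) (pvPrev_maximal hlt hm)

theorem pvPrev_succ (x : Int) :
    pvPrev (x + 1) = if pvIsMult x then x else pvPrev x := by
  split
  case isTrue h =>
    exact pvPrev_eq (by omega) ((pvIsMult_iff x).1 h) (fun m hm _ => by omega)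
  case isFalse h =>
    refine pvPrev_eq (by have := pvPrev_lt x; omega) (pvPrev_mult x) ?_
    intro m hm hd
    have hne : m ≠ x := fun he => h (he ▸ (pvIsMult_iff m).2 hd)
    exact pvPrev_maximal (by omega) hd

-- the chain of successive predecessor multiples below x (proof-only helper)
def pvChain (x : Int) : List Int :=
  if h : 1 ≤ pvPrev x then pvPrev x :: pvChain (pvPrev x) else []
termination_by x.toNat
decreasing_by
  have := pvPrev_lt x
  omega

theorem pvChain_of_lt {x : Int} (h : pvPrev x < 1) : pvChain x = [] := by
  rw [pvChain]; simp [not_le.mpr h]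

theorem pvChain_of_ge {x : Int} (h : 1 ≤ pvPrev x) :
    pvChain x = pvPrev x :: pvChain (pvPrev x) := by
  rw [pvChain]; simp [h]

-- A's filtered countdown list IS the predecessor chain
theorem pvFilter_eq_chain_aux : ∀ n : Int, 1 ≤ n →
    (PySem.List.pyRange (n - 1) 0 (-1)).filter pvIsMult = pvChain n := by
  intro n hn
  induction n, hn using Int.le_induction with
  | base =>
    rw [show (1:Int) - 1 = 0 by ring, PySem.List.pyRange_neg_one_eq_nil (by omega),
      List.filter_nil, pvChain_of_lt (by have := pvPrev_lt 1; omega)]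
  | succ n hn1 ih =>
    rw [show n + 1 - 1 = n by ring, PySem.List.pyRange_neg_one_cons (by omega),
      List.filter_cons]
    cases hm : pvIsMult n with
    | true =>
      have hp : pvPrev (n + 1) = n := by rw [pvPrev_succ, hm]; rfl
      rw [pvChain_of_ge (by omega : 1 ≤ pvPrev (n+1))]
      simp [hp, ih]
    | false =>
      have hp : pvPrev (n + 1) = pvPrev n := by rw [pvPrev_succ, hm]; rfl
      simp only [Bool.false_eq_true, if_false, ih]
      rcases (by omega : pvPrev n < 1 ∨ 1 ≤ pvPrev n) with h1 | h1
      · rw [pvChain_of_lt (by omega : pvPrev (n+1) < 1), pvChain_of_lt h1]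
      · rw [pvChain_of_ge (by omega : 1 ≤ pvPrev (n+1)), pvChain_of_ge h1, hp]

theorem pvFilter_eq_chain (n : Int) :
    (PySem.List.pyRange (n - 1) 0 (-1)).filter pvIsMult = pvChain n := by
  rcases (by omega : n ≤ 1 ∨ 1 ≤ n) with hn | hn
  · rw [PySem.List.pyRange_neg_one_eq_nil (by omega), List.filter_nil,
      pvChain_of_lt (by have := pvPrev_lt n; omega)]
  · exact pvFilter_eq_chain_aux n hn

-- tripleSum machinery (A's indexed loop characterised)
def pvTrip (x y z : Int) : Int :=
  if PySem.Int.mod (x - y) 2 = 0 ∧ PySem.Int.mod (y - z) 2 = 0 ∧ x - y = y - z then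
    pvCnt5 x + pvCnt5 y + pvCnt5 z
  else 0

def pvTripleSum : List Int → Int
  | x :: y :: z :: rest => pvTrip x y z + pvTripleSum (y :: z :: rest)
  | _ => 0

theorem pvFoldl_eq_sum (l : List Nat) (step : Int → Nat → Int) (g : Nat → Int)
    (hstep : ∀ acc k, step acc k = acc + g k) :
    ∀ acc : Int, l.foldl step acc = acc + (l.map g).sum := by
  induction l with
  | nil => intro acc; simp
  | cons k rest ih =>
    intro acc
    simp only [List.foldl_cons, List.map_cons, List.sum_cons, hstep, ih]
    ring

theorem pvA_sum (L : List Int) :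
    ((List.range (L.length - 2)).map
      (fun k => pvTrip (L.getD k 0) (L.getD (k + 1) 0) (L.getD (k + 2) 0))).sum
      = pvTripleSum L := by
  induction L with
  | nil => simp [pvTripleSum]
  | cons x tail ih =>
    match tail with
    | [] => simp [pvTripleSum]
    | [y] => simp [pvTripleSum]
    | y :: z :: rest =>
      have hlen : (x :: y :: z :: rest).length - 2 = ((y :: z :: rest).length - 2) + 1 := by
        simp
      rw [hlen, List.range_succ_eq_map]
      simp only [List.map_cons, List.map_map, List.sum_cons]
      have hshift : ((List.range ((y :: z :: rest).length - 2)).map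
          ((fun k => pvTrip ((x :: y :: z :: rest).getD k 0)
            ((x :: y :: z :: rest).getD (k + 1) 0)
            ((x :: y :: z :: rest).getD (k + 2) 0)) ∘ Nat.succ)).sum
          = pvTripleSum (y :: z :: rest) := by
        rw [← ih]
        congr 1
      rw [hshift]
      simp [pvTripleSum]

-- the guarded triple term vanishes when the second predecessor is below 1
theorem pvTripB_eq_zero {a : Int} (h : pvPrev (pvPrev a) < 1) : pvTripB a = 0 := by
  have hnc : ¬ (0 < pvPrev (pvPrev a) ∧ a - pvPrev a = pvPrev a - pvPrev (pvPrev a) ∧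
      PySem.Int.mod (a - pvPrev a) 2 = 0) := by
    rintro ⟨hc, -, -⟩; omega
  simp only [pvTripB]
  rw [if_neg hnc]

-- on a full window A's triple test agrees with B's closed-form one
theorem pvTrip_eq_tripB (a : Int) (h : 1 ≤ pvPrev (pvPrev a)) :
    pvTrip a (pvPrev a) (pvPrev (pvPrev a)) = pvTripB a := by
  have hm2 : ∀ z : Int, PySem.Int.mod z 2 = z % 2 := fun z =>
    PySem.Int.mod_eq_emod_of_pos (by norm_num)
  simp only [pvTrip, pvTripB, hm2]
  split_ifs with h1 h2 <;> first | rfl | (exfalso; omega)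

-- the triple sum over the chain equals the pointwise pvTripB sum over the chain
theorem pvTripleSum_chain_aux : ∀ (k : Nat) (x : Int), x.toNat ≤ k →
    pvTripleSum (pvChain x) = ((pvChain x).map pvTripB).sum := by
  intro k
  induction k with
  | zero =>
    intro x hx
    have hp : pvPrev x < 1 := by have := pvPrev_lt x; omega
    simp [pvChain_of_lt hp, pvTripleSum]
  | succ k ih =>
    intro x hx
    rcases (by omega : pvPrev x < 1 ∨ 1 ≤ pvPrev x) with hp | hp
    · simp [pvChain_of_lt hp, pvTripleSum]
    · have hpx : pvPrev x < x := pvPrev_lt x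
      have hple : (pvPrev x).toNat ≤ k := by omega
      rw [pvChain_of_ge hp]
      rcases (by omega : pvPrev (pvPrev x) < 1 ∨ 1 ≤ pvPrev (pvPrev x)) with hq | hq
      · rw [pvChain_of_lt hq]
        have hz : pvTripB (pvPrev x) = 0 :=
          pvTripB_eq_zero (by have := pvPrev_lt (pvPrev (pvPrev x)); omega)
        simp [pvTripleSum, hz]
      · rw [pvChain_of_ge hq]
        rcases (by omega : pvPrev (pvPrev (pvPrev x)) < 1 ∨ 1 ≤ pvPrev (pvPrev (pvPrev x))) with hr | hr
        · rw [pvChain_of_lt hr]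
          have hz1 : pvTripB (pvPrev x) = 0 := pvTripB_eq_zero hr
          have hz2 : pvTripB (pvPrev (pvPrev x)) = 0 :=
            pvTripB_eq_zero (by have := pvPrev_lt (pvPrev (pvPrev (pvPrev x))); omega)
          simp [pvTripleSum, hz1, hz2]
        · rw [pvChain_of_ge hr]
          have hrec := ih (pvPrev x) hple
          rw [pvChain_of_ge hq, pvChain_of_ge hr] at hrec
          simp only [pvTripleSum, List.map_cons, List.sum_cons] at hrec ⊢
          rw [pvTrip_eq_tripB (pvPrev x) hr, hrec]

theorem pvTripleSum_chain (x : Int) :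
    pvTripleSum (pvChain x) = ((pvChain x).map pvTripB).sum :=
  pvTripleSum_chain_aux x.toNat x le_rfl

-- ===== the inclusion-exclusion step =====

theorem pvChain_mem (n m : Int) :
    m ∈ pvChain n ↔ 1 ≤ m ∧ m < n ∧ (9 ∣ m ∨ 14 ∣ m) := by
  rw [← pvFilter_eq_chain, List.mem_filter, PySem.List.mem_pyRange_neg_one, pvIsMult_iff]
  omega

theorem pvChain_nodup (n : Int) : (pvChain n).Nodup := by
  rw [← pvFilter_eq_chain]
  refine List.Nodup.filter _ ?_
  rw [PySem.List.pyRange_neg_one]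
  refine List.Nodup.map ?_ (List.nodup_range)
  intro i j h
  simp only at h
  omega

theorem pvNodup_pyRange {a b s : Int} (hs : 0 < s) : (PySem.List.pyRange a b s).Nodup := by
  rw [PySem.List.pyRange_of_pos a b hs]
  refine List.Nodup.map ?_ (List.nodup_range)
  intro i j h
  simp only at h
  have h2 : s * (i : Int) = s * (j : Int) := by linarith
  have h3 : (i : Int) = (j : Int) := mul_left_cancel₀ (by omega) h2
  exact_mod_cast h3

theorem pvChain_sum_ie (n : Int) :
    ((pvChain n).map pvTripB).sum
      = ((PySem.List.pyRange 9 n 9).map pvTripB).sum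
        + ((PySem.List.pyRange 14 n 14).map pvTripB).sum
        - ((PySem.List.pyRange 126 n 126).map pvTripB).sum := by
  have h9 : ∀ m : Int, m ∈ PySem.List.pyRange 9 n 9 ↔ 9 ∣ m ∧ 1 ≤ m ∧ m < n := by
    intro m
    rw [PySem.List.mem_pyRange_iff_of_pos (by norm_num)]
    omega
  have h14 : ∀ m : Int, m ∈ PySem.List.pyRange 14 n 14 ↔ 14 ∣ m ∧ 1 ≤ m ∧ m < n := by
    intro m
    rw [PySem.List.mem_pyRange_iff_of_pos (by norm_num)]
    omega
  have h126 : ∀ m : Int, m ∈ PySem.List.pyRange 126 n 126 ↔ 126 ∣ m ∧ 1 ≤ m ∧ m < n := by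
    intro m
    rw [PySem.List.mem_pyRange_iff_of_pos (by norm_num)]
    omega
  have key : (pvChain n).toFinset
      = (PySem.List.pyRange 9 n 9).toFinset ∪ (PySem.List.pyRange 14 n 14).toFinset := by
    ext m
    simp only [List.mem_toFinset, Finset.mem_union, pvChain_mem, h9, h14]
    omega
  have key2 : (PySem.List.pyRange 126 n 126).toFinset
      = (PySem.List.pyRange 9 n 9).toFinset ∩ (PySem.List.pyRange 14 n 14).toFinset := by
    ext m
    simp only [List.mem_toFinset, Finset.mem_inter, h9, h14, h126]
    omega
  have hui := Finset.sum_union_inter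
    (s₁ := (PySem.List.pyRange 9 n 9).toFinset) (s₂ := (PySem.List.pyRange 14 n 14).toFinset)
    (f := pvTripB)
  rw [← key, ← key2] at hui
  rw [List.sum_toFinset pvTripB (pvChain_nodup n),
      List.sum_toFinset pvTripB (pvNodup_pyRange (by norm_num)),
      List.sum_toFinset pvTripB (pvNodup_pyRange (by norm_num)),
      List.sum_toFinset pvTripB (pvNodup_pyRange (by norm_num))] at hui
  linarith

-- ===== VERDICT (by name: the statement is the Claim_ definition above) =====
theorem five_div_seq_spec : Claim_equal_five_div_seq := by
  unfold Claim_equal_five_div_seq Spec_five_div_seq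
  intro n _
  set L := (PySem.List.pyRange (n - 1) 0 (-1)).filter pvIsMult with hL
  have hA : five_div_seq n = pvTripleSum L := by
    unfold five_div_seq
    rw [← hL]
    rw [← pvA_sum L]
    simp only [PySem.List.len_eq]
    rw [PySem.List.pyRange_one]
    have hm : (((L.length : Int) - 2) - 0).toNat = L.length - 2 := by omega
    rw [hm, List.foldl_map]
    rw [pvFoldl_eq_sum _ _
      (fun k => pvTrip (L.getD k 0) (L.getD (k + 1) 0) (L.getD (k + 2) 0))]
    · simp
    · intro acc k
      have g0 : PySem.List.pyGetD L ((0 : Int) + (k : Int)) 0 = L.getD k 0 := by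
        rw [show (0 : Int) + (k : Int) = ((k : Nat) : Int) by ring,
          PySem.List.pyGetD_natCast]
      have g1 : PySem.List.pyGetD L ((0 : Int) + (k : Int) + 1) 0 = L.getD (k + 1) 0 := by
        rw [show (0 : Int) + (k : Int) + 1 = ((k + 1 : Nat) : Int) by push_cast; ring,
          PySem.List.pyGetD_natCast]
      have g2 : PySem.List.pyGetD L ((0 : Int) + (k : Int) + 2) 0 = L.getD (k + 2) 0 := by
        rw [show (0 : Int) + (k : Int) + 2 = ((k + 2 : Nat) : Int) by push_cast; ring,
          PySem.List.pyGetD_natCast]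
      simp only [g0, g1, g2, pvTrip]
      split_ifs <;> ring
  rw [hA, hL, pvFilter_eq_chain, pvTripleSum_chain, pvChain_sum_ie]
  rfl
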